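-- pv_equiv track=rewrite | github.com/abarajithan11/digital-design | scripts/vcd_to_svg.py | _encode_scalar
-- ===== SOURCE A (Python) =====
-- def _is_unknown(value: str) -> bool:
--     v = value.lower()
--     return "x" in v or "z" in v
--
-- def _bit_char(value: str) -> str:
--     v = value.lower()
--     if _is_unknown(v):
--         return "x"
--     return "1" if v.endswith("1") else "0"
--
-- def _encode_scalar(samples):
--     wave = []
--     prev = None
--     for sample in samples:
--         cur = _bit_char(sample)
--         if prev is not None and cur == prev:
--             wave.append(".")
--         else:
--             wave.append(cur)
--         prev = cur
--     return "".join(wave), []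
-- ===== SOURCE B (Python) =====
-- def _is_unknown(value: str) -> bool:
--     v = value.lower()
--     return "x" in v or "z" in v
--
-- def _bit_char(value: str) -> str:
--     v = value.lower()
--     if _is_unknown(v):
--         return "x"
--     return "1" if v.endswith("1") else "0"
--
-- def _encode_scalar(samples):
--     # Phase 1: map every sample to its bit char; Phase 2: run-length group
--     # the chars, emitting each run as 'first char + dots for the repeats'.
--     chars = [_bit_char(s) for s in samples]
--     n = len(chars)
--     pieces = []
--     i = 0
--     while i < n:
--         j = i + 1
--         while j < n and chars[j] == chars[i]:
--             j += 1
--         pieces.append(chars[i] + "." * (j - i - 1))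
--         i = j
--     return "".join(pieces), []
-- ===== Notes on version B (the rewrite author's own statement) =====
-- stated objective: alternative
-- what changed: A is a single stateful pass carrying the previous bit char and emitting one symbol per sample; B first maps every sample to its bit char, then run-length groups that list, emitting each run as its char followed by dots.
import Mathlib
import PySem

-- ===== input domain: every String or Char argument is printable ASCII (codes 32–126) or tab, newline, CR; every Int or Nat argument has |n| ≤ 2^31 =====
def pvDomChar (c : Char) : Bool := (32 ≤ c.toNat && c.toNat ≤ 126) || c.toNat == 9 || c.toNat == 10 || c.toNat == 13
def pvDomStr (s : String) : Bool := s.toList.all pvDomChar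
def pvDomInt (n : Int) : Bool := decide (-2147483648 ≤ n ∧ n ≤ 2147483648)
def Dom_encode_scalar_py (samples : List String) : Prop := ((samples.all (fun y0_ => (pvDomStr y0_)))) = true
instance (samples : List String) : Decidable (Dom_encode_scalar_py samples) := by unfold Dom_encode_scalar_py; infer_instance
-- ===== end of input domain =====

-- B re-implements the encoding as map-to-bit-chars then run-length grouping (alternative decomposition, same cost).

-- ===== PORT A =====
def pvIsUnknown (value : String) : Bool :=
  let v := PySem.Str.lower value
  PySem.Str.isIn "x" v || PySem.Str.isIn "z" v

def pvBitChar (value : String) : String :=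
  let v := PySem.Str.lower value
  if pvIsUnknown v then "x"
  else if PySem.Str.endswith v "1" then "1" else "0"

def pvStepA (st : List String × Option String) (sample : String) : List String × Option String :=
  let cur := pvBitChar sample
  (if st.2.isSome && (st.2 == some cur) then st.1 ++ ["."] else st.1 ++ [cur], some cur)

def encode_scalar_py (samples : List String) : String × List String :=
  let st := samples.foldl pvStepA ([], none)
  (PySem.Str.join "" st.1, [])

-- ===== PORT B =====
-- run-length grouping: Source B's index-based while loop over `chars`, transcribed as
-- structural recursion (the inner `while chars[j] == chars[i]` is takeWhile/dropWhile)
def pvRuns : List String → List String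
  | [] => []
  | c :: rest =>
      (c ++ String.ofList (List.replicate (rest.takeWhile (· == c)).length '.'))
        :: pvRuns (rest.dropWhile (· == c))
  termination_by l => l.length
  decreasing_by
    simpa using Nat.lt_succ_of_le (List.length_dropWhile_le _ _)

def encode_scalar_py_alt (samples : List String) : String × List String :=
  let chars := samples.map pvBitChar
  (PySem.Str.join "" (pvRuns chars), [])

-- ===== PRECONDITION & SPEC =====
def Spec_encode_scalar_py (samples : List String) (out : String × List String) : Prop := out = encode_scalar_py_alt samples
instance (samples : List String) (out : String × List String) : Decidable (Spec_encode_scalar_py samples out) := by unfold Spec_encode_scalar_py; infer_instance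

-- ===== CLAIM (what is proved, stated in full; the proofs are below) =====
def Claim_equal_encode_scalar_py : Prop := ∀ (samples : List String), Dom_encode_scalar_py samples → Spec_encode_scalar_py samples (encode_scalar_py samples)

-- ===== LEMMAS AND PROOFS =====

-- A's wave list, with the accumulator abstracted away
def pvWaveA : Option String → List String → List String
  | _, [] => []
  | prev, c :: cs => (if prev == some c then "." else c) :: pvWaveA (some c) cs

lemma pv_foldA (samples : List String) : ∀ (acc : List String) (prev : Option String),
    (samples.foldl pvStepA (acc, prev)).1 = acc ++ pvWaveA prev (samples.map pvBitChar) := by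
  induction samples with
  | nil => intro acc prev; simp [pvWaveA]
  | cons s rest ih =>
    intro acc prev
    rw [List.foldl_cons]
    cases prev with
    | none =>
      have hs : pvStepA (acc, none) s = (acc ++ [pvBitChar s], some (pvBitChar s)) := by
        simp [pvStepA]
      rw [hs, ih]
      simp [pvWaveA]
    | some p =>
      by_cases h : p = pvBitChar s
      · have hs : pvStepA (acc, some p) s = (acc ++ ["."], some (pvBitChar s)) := by
          simp [pvStepA, h]
        rw [hs, ih]
        simp [pvWaveA, h]
      · have hs : pvStepA (acc, some p) s = (acc ++ [pvBitChar s], some (pvBitChar s)) := by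
          simp [pvStepA, h]
        rw [hs, ih]
        simp [pvWaveA, h]

lemma pv_wave_run (cs : List String) : ∀ (c : String),
    pvWaveA (some c) cs
      = List.replicate (cs.takeWhile (· == c)).length "."
        ++ pvWaveA none (cs.dropWhile (· == c)) := by
  induction cs with
  | nil => intro c; simp [pvWaveA]
  | cons d ds ih =>
    intro c
    by_cases h : d = c
    · subst h
      simp [pvWaveA, ih d, List.replicate_succ]
    · have h' : (d == c) = false := by simp [h]
      have h'' : (c == d) = false := by simp [Ne.symm h]
      simp [pvWaveA, h', h'']

lemma pv_join_nil_flatten (parts : List (List Char)) :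
    PySem.Chars.join [] parts = parts.flatten := by
  induction parts with
  | nil => simp [PySem.Chars.join_nil]
  | cons p ps ih =>
    cases ps with
    | nil => simp [PySem.Chars.join_singleton]
    | cons q qs => simp [PySem.Chars.join_cons_cons, ih]

lemma pv_flat_rep (k : Nat) : (List.replicate k ['.']).flatten = List.replicate k '.' := by
  induction k with
  | zero => simp
  | succ n ih => simp [List.replicate_succ, ih]

lemma pv_str_eq_of_toList {a b : String} (h : a.toList = b.toList) : a = b := by
  have := congrArg String.ofList h
  simpa using this

lemma pv_pieces_flatten (l : List String) :
    ((pvWaveA none l).map String.toList).flatten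
      = ((pvRuns l).map String.toList).flatten := by
  induction l using pvRuns.induct with
  | case1 => simp [pvWaveA, pvRuns]
  | case2 c rest ih =>
    have hw : pvWaveA none (c :: rest)
        = c :: (List.replicate (rest.takeWhile (· == c)).length "."
                ++ pvWaveA none (rest.dropWhile (· == c))) := by
      simp [pvWaveA, pv_wave_run]
    rw [hw, pvRuns]
    simp only [List.map_cons, List.map_append, List.map_replicate, List.flatten_cons,
      List.flatten_append, String.toList_append, ih]
    have hdot : (".".toList : List Char) = ['.'] := by decide
    have hmk : (String.ofList (List.replicate (rest.takeWhile (· == c)).length '.')).toList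
        = List.replicate (rest.takeWhile (· == c)).length '.' := by simp
    rw [hdot, hmk, pv_flat_rep]
    simp [List.append_assoc]

-- ===== VERDICT (by name: the statement is the Claim_ definition above) =====
theorem encode_scalar_py_spec : Claim_equal_encode_scalar_py := by
  unfold Claim_equal_encode_scalar_py
  intro samples _
  unfold Spec_encode_scalar_py encode_scalar_py encode_scalar_py_alt
  simp only [pv_foldA samples [] none, List.nil_append]
  refine Prod.ext ?_ rfl
  apply pv_str_eq_of_toList
  simp only [PySem.Str.toList_join]
  have h0 : ("".toList : List Char) = [] := rfl
  rw [h0, pv_join_nil_flatten, pv_join_nil_flatten]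
  exact pv_pieces_flatten (samples.map pvBitChar)
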